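-- pv_equiv track=rewrite | github.com/betrueone/CliqueAI | test_algorithm.py | is_valid_maximum_clique
-- ===== SOURCE A (Python) =====
-- def is_valid_maximum_clique(number_of_nodes: int, adjacency_list: list[list[int]], nodes: list[int]) -> bool:
--     """
--     Returns True if the given nodes form a clique in the graph.
--     """
--     node_set = set(nodes)
--     # 0. Check if the node set is empty
--     if len(node_set) == 0:
--         return False
--
--     # 1. Check for duplicates or out-of-range nodes
--     if len(node_set) != len(nodes):
--         return False
--     if not node_set.issubset(range(number_of_nodes)):
--         return False
--
--     # 2. Check if all pairs of nodes are connected (i.e., form a clique)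
--     for i in range(len(nodes)):
--         for j in range(i + 1, len(nodes)):
--             if nodes[j] not in adjacency_list[nodes[i]]:
--                 return False
--
--     # 3. Check if any other node can be added to form a larger clique
--     all_nodes = set(range(number_of_nodes))
--     remaining_nodes = all_nodes - node_set
--     for candidate in remaining_nodes:
--         # Candidate must be connected to all nodes in the current clique
--         if node_set.issubset(adjacency_list[candidate]):
--             return False  # Clique can be extended, so it's not maximum
--
--     return True
-- ===== SOURCE B (Python) =====
-- def is_valid_maximum_clique(number_of_nodes: int, adjacency_list: list[list[int]], nodes: list[int]) -> bool:
--     clique = set(nodes)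
--     if not nodes or len(clique) != len(nodes):
--         return False
--     if any(v < 0 or v >= number_of_nodes for v in nodes):
--         return False
--     # clique check: one reverse pass, each node must be adjacent to every node after it
--     seen = set()
--     for u in reversed(nodes):
--         if not seen.issubset(adjacency_list[u]):
--             return False
--         seen.add(u)
--     # maximality: intersect the reverse-adjacency candidate sets across the clique
--     candidates = list(range(number_of_nodes))
--     for c in nodes:
--         candidates = [v for v in candidates if c in adjacency_list[v]]
--     return all(v in clique for v in candidates)
-- ===== Notes on version B (the rewrite author's own statement) =====
-- stated objective: alternative
-- what changed: The index-nested pairwise loop is replaced by a single reverse pass that accumulates a 'seen' set and tests seen ⊆ adj[u], and the per-candidate clique-subset scan is replaced by progressively intersecting the reverse-adjacency candidate sets (filtering range(n) once per clique member) and then checking every survivor is already in the clique.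
-- outside the precondition, e.g. on is_valid_maximum_clique(1, [], [0]): A returns True, B raises IndexError; on is_valid_maximum_clique(3, [[]], [0, 1]): A returns False, B raises IndexError
import Mathlib
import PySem

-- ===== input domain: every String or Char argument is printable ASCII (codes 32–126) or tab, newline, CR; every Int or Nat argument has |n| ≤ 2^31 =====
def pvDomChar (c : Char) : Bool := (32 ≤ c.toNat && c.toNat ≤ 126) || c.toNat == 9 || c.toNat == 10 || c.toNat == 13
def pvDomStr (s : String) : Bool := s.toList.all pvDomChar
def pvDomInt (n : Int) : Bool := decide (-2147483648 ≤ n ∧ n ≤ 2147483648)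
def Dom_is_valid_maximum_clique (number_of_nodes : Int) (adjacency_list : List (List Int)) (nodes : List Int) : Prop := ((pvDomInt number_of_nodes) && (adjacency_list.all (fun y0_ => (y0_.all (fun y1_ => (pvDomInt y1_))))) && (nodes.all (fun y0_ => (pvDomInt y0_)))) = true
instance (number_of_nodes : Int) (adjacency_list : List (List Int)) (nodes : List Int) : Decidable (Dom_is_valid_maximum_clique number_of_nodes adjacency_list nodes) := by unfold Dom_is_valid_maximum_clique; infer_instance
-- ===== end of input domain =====

-- B replaces A's index-nested pairwise loop by one reverse pass with an accumulated 'seen' set,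
-- and A's per-candidate clique-subset scan by progressive intersection of reverse-adjacency
-- candidate sets across the clique (objective: alternative decomposition, similar cost).

-- ===== PORT A =====
def is_valid_maximum_clique (number_of_nodes : Int) (adjacency_list : List (List Int)) (nodes : List Int) : Bool :=
  let node_set : PySem.Set Int := PySem.Set.ofList nodes
  -- 0. empty node set
  if node_set.length = 0 then false
  -- 1. duplicates or out-of-range nodes
  else if node_set.length ≠ nodes.length then false
  else if ¬ (PySem.Set.issubset node_set (PySem.List.pyRange 0 number_of_nodes 1) = true) then false
  -- 2. all pairs connected
  else if ¬ ((PySem.List.pyRange 0 (nodes.length : Int) 1).all (fun i =>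
        (PySem.List.pyRange (i + 1) (nodes.length : Int) 1).all (fun j =>
          decide ((PySem.List.pyGetD nodes j 0) ∈
            (PySem.List.pyGet? adjacency_list (PySem.List.pyGetD nodes i 0)).getD []))) = true) then false
  -- 3. no other node extends the clique
  else
    let all_nodes : PySem.Set Int := PySem.Set.ofList (PySem.List.pyRange 0 number_of_nodes 1)
    let remaining : PySem.Set Int := PySem.Set.diff all_nodes node_set
    ! remaining.any (fun candidate =>
        PySem.Set.issubset node_set ((PySem.List.pyGet? adjacency_list candidate).getD []))

-- ===== PORT B =====
-- reverse pass of Source B: every node must be adjacent to every node seen after it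
def pvRevPass (adjacency_list : List (List Int)) : List Int → PySem.Set Int → Bool
  | [], _ => true
  | u :: rest, seen =>
      if PySem.Set.issubset seen ((PySem.List.pyGet? adjacency_list u).getD []) = true then
        pvRevPass adjacency_list rest (PySem.Set.add seen u)
      else false

def is_valid_maximum_clique_alt (number_of_nodes : Int) (adjacency_list : List (List Int)) (nodes : List Int) : Bool :=
  let clique : PySem.Set Int := PySem.Set.ofList nodes
  if nodes.isEmpty || clique.length ≠ nodes.length then false
  else if nodes.any (fun v => decide (v < 0) || decide (number_of_nodes ≤ v)) then false
  else if ¬ (pvRevPass adjacency_list nodes.reverse PySem.Set.empty = true) then false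
  else
    let candidates := nodes.foldl
      (fun cand c => cand.filter (fun v =>
        decide (c ∈ (PySem.List.pyGet? adjacency_list v).getD [])))
      (PySem.List.pyRange 0 number_of_nodes 1)
    candidates.all (fun v => decide (v ∈ clique))

-- ===== PRECONDITION & SPEC =====
-- Pre_ excludes exactly the inputs where, after the guards pass, some vertex index below
-- number_of_nodes is missing from adjacency_list: there the Python A either raises IndexError
-- or (when no index is ever touched) returns a value B cannot match because B's own candidate
-- scan raises IndexError on those inputs.
def Pre_is_valid_maximum_clique (number_of_nodes : Int) (adjacency_list : List (List Int)) (nodes : List Int) : Prop :=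
  (nodes ≠ [] ∧ nodes.Nodup ∧ (∀ v ∈ nodes, 0 ≤ v ∧ v < number_of_nodes)) →
    number_of_nodes ≤ (adjacency_list.length : Int)
instance (number_of_nodes : Int) (adjacency_list : List (List Int)) (nodes : List Int) : Decidable (Pre_is_valid_maximum_clique number_of_nodes adjacency_list nodes) := by unfold Pre_is_valid_maximum_clique; infer_instance

def pvWitness_is_valid_maximum_clique : Int × List (List Int) × List Int := (2, [[1], [0]], [0, 1])

def Spec_is_valid_maximum_clique (number_of_nodes : Int) (adjacency_list : List (List Int)) (nodes : List Int) (out : Bool) : Prop := out = is_valid_maximum_clique_alt number_of_nodes adjacency_list nodes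
instance (number_of_nodes : Int) (adjacency_list : List (List Int)) (nodes : List Int) (out : Bool) : Decidable (Spec_is_valid_maximum_clique number_of_nodes adjacency_list nodes out) := by unfold Spec_is_valid_maximum_clique; infer_instance

-- ===== CLAIM (what is proved, stated in full; the proofs are below) =====
def Claim_equal_is_valid_maximum_clique : Prop := ∀ (number_of_nodes : Int) (adjacency_list : List (List Int)) (nodes : List Int), Dom_is_valid_maximum_clique number_of_nodes adjacency_list nodes → Pre_is_valid_maximum_clique number_of_nodes adjacency_list nodes → Spec_is_valid_maximum_clique number_of_nodes adjacency_list nodes (is_valid_maximum_clique number_of_nodes adjacency_list nodes)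

-- ===== LEMMAS AND PROOFS =====

-- A's nested index loops say exactly: nodes is pairwise forward-adjacent.
lemma pvA_pairwise_iff (adjacency_list : List (List Int)) (nodes : List Int) :
    ((PySem.List.pyRange 0 (nodes.length : Int) 1).all (fun i =>
        (PySem.List.pyRange (i + 1) (nodes.length : Int) 1).all (fun j =>
          decide ((PySem.List.pyGetD nodes j 0) ∈
            (PySem.List.pyGet? adjacency_list (PySem.List.pyGetD nodes i 0)).getD []))) = true)
    ↔ List.Pairwise (fun a b => b ∈ (PySem.List.pyGet? adjacency_list a).getD []) nodes := by
  rw [List.pairwise_iff_getElem]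
  simp only [List.all_eq_true, PySem.List.mem_pyRange_one, decide_eq_true_eq]
  constructor
  · intro h i j hi hj hij
    have := h (i : Int) ⟨Int.natCast_nonneg i, by exact_mod_cast hi⟩ (j : Int)
      ⟨by exact_mod_cast hij, by exact_mod_cast hj⟩
    rwa [PySem.List.pyGetD_natCast, PySem.List.pyGetD_natCast,
         List.getD_eq_getElem _ _ hi, List.getD_eq_getElem _ _ hj] at this
  · intro h i hi j hj
    have h1 := h i.toNat j.toNat (by omega) (by omega) (by omega)
    rw [show i = ((i.toNat : Nat) : Int) by omega, show j = ((j.toNat : Nat) : Int) by omega,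
        PySem.List.pyGetD_natCast, PySem.List.pyGetD_natCast,
        List.getD_eq_getElem _ _ (by omega), List.getD_eq_getElem _ _ (by omega)]
    exact h1

-- B's reverse pass, characterised.
lemma pvRevPass_iff (adjacency_list : List (List Int)) (l : List Int) (seen : PySem.Set Int) :
    pvRevPass adjacency_list l seen = true ↔
      ((∀ x ∈ seen, ∀ u ∈ l, x ∈ (PySem.List.pyGet? adjacency_list u).getD []) ∧
        List.Pairwise (fun a b => a ∈ (PySem.List.pyGet? adjacency_list b).getD []) l) := by
  induction l generalizing seen with
  | nil => simp [pvRevPass]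
  | cons u rest ih =>
    simp only [pvRevPass]
    split_ifs with h
    · rw [ih]
      rw [PySem.Set.issubset_iff] at h
      simp only [List.pairwise_cons, List.mem_cons, PySem.Set.mem_add]
      constructor
      · rintro ⟨hs, hp⟩
        refine ⟨?_, ?_, hp⟩
        · rintro x hx w (rfl | hw)
          · exact h x hx
          · exact hs x (Or.inl hx) w hw
        · intro w hw; exact hs u (Or.inr rfl) w hw
      · rintro ⟨hs, hu, hp⟩
        refine ⟨?_, hp⟩
        rintro x (hx | rfl) w hw
        · exact hs x hx w (Or.inr hw)
        · exact hu w hw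
    · simp only [false_iff]
      rintro ⟨hs, -⟩
      exact h (by rw [PySem.Set.issubset_iff]; intro x hx; exact hs x hx u List.mem_cons_self)

-- folding a filter is filtering by the conjunction
lemma pvFoldlFilter (l : List Int) (p : Int → Int → Bool) (init : List Int) :
    l.foldl (fun cand c => cand.filter (p c)) init
      = init.filter (fun v => l.all (fun c => p c v)) := by
  induction l generalizing init with
  | nil => simp
  | cons c rest ih =>
    simp only [List.foldl_cons, ih, List.filter_filter, List.all_cons]
    congr 1
    funext v
    rw [Bool.and_comm]

theorem is_valid_maximum_clique_spec : Claim_equal_is_valid_maximum_clique := by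
  intro n adj nodes _hdom _hpre
  unfold Spec_is_valid_maximum_clique is_valid_maximum_clique is_valid_maximum_clique_alt
  simp only []
  by_cases hempty : nodes = []
  · subst hempty; simp [PySem.Set.ofList]
  have hlen0 : ¬ (PySem.Set.ofList nodes).length = 0 := by
    simp only [List.length_eq_zero_iff]
    intro h
    exact hempty (by cases nodes with
      | nil => rfl
      | cons a t => simp [PySem.Set.ofList_cons] at h)
  rw [if_neg hlen0]
  by_cases hdup : (PySem.Set.ofList nodes).length = nodes.length
  · rw [if_neg (show ¬ ((PySem.Set.ofList nodes).length ≠ nodes.length) from not_not_intro hdup),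
        if_neg (show ¬ ((nodes.isEmpty || decide ((PySem.Set.ofList nodes).length ≠ nodes.length)) = true) from by
          simp [hempty, hdup])]
    -- range guards agree
    have hrange : (PySem.Set.issubset (PySem.Set.ofList nodes) (PySem.List.pyRange 0 n 1) = true)
        ↔ ¬ (nodes.any (fun v => decide (v < 0) || decide (n ≤ v)) = true) := by
      rw [PySem.Set.issubset_iff]
      simp only [PySem.Set.mem_ofList, PySem.List.mem_pyRange_one, List.any_eq_true,
        Bool.or_eq_true, decide_eq_true_eq, not_exists, not_and, not_or, not_lt, not_le]
    by_cases hr : PySem.Set.issubset (PySem.Set.ofList nodes) (PySem.List.pyRange 0 n 1) = true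
    · rw [if_neg (not_not_intro hr), if_neg (hrange.mp hr)]
      -- pairwise guards agree
      have hpair : ((PySem.List.pyRange 0 (nodes.length : Int) 1).all (fun i =>
            (PySem.List.pyRange (i + 1) (nodes.length : Int) 1).all (fun j =>
              decide ((PySem.List.pyGetD nodes j 0) ∈
                (PySem.List.pyGet? adj (PySem.List.pyGetD nodes i 0)).getD []))) = true)
          ↔ (pvRevPass adj nodes.reverse PySem.Set.empty = true) := by
        rw [pvA_pairwise_iff, pvRevPass_iff]
        simp only [PySem.Set.empty, List.not_mem_nil, false_implies, implies_true, true_and,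
          List.pairwise_reverse]
      by_cases hp : pvRevPass adj nodes.reverse PySem.Set.empty = true
      · rw [if_neg (not_not_intro (hpair.mpr hp)), if_neg (not_not_intro hp)]
        -- maximality parts agree
        rw [pvFoldlFilter nodes
          (fun c v => decide (c ∈ (PySem.List.pyGet? adj v).getD [])) (PySem.List.pyRange 0 n 1)]
        rw [Bool.eq_iff_iff]
        simp only [Bool.not_eq_true', List.any_eq_false, List.all_eq_true, List.mem_filter,
          decide_eq_true_eq, PySem.Set.mem_ofList, PySem.Set.mem_diff, PySem.Set.issubset_iff,
          PySem.List.mem_pyRange_one]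
        constructor
        · intro h v ⟨hv, hall⟩
          by_contra hvn
          exact h v ⟨hv, hvn⟩ hall
        · intro h v ⟨hv, hvn⟩ hall
          exact hvn (h v ⟨hv, hall⟩)
      · rw [if_pos (fun h => hp (hpair.mp h)), if_pos hp]
    · rw [if_pos hr, if_pos (not_not.mp (fun h => hr (hrange.mpr h)))]
  · rw [if_pos (show (PySem.Set.ofList nodes).length ≠ nodes.length from hdup),
        if_pos (show (nodes.isEmpty || decide ((PySem.Set.ofList nodes).length ≠ nodes.length)) = true from by
          simp [hdup])]
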